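-- pv_equiv track=rewrite | github.com/anloro/modular_slam | scripts/DrawPosesRaw.py | processConstraintLine
-- ===== SOURCE A (Python) =====
-- def processConstraintLine(line):
--     """"Process a text line with the constraint format
--         # idFrom idTo0 idTo1 ...
--         input: line
--         output: string idFrom, list IdTo"""
--
--     spaceCount = 0
--     idFrom = ""
--     idTo = ""
--
--     for char in line:
--         if spaceCount > 0 and char != "\n":
--             idTo += char
--         if char == " ":
--             spaceCount += 1
--         elif spaceCount == 0:
--             idFrom += char
--
--     idToList = list(idTo.split(" "))
--     idToList = [x for x in idToList if x] # erase possible empty elements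
--
--     return idFrom, idToList
-- ===== SOURCE B (Python) =====
-- def processConstraintLine(line):
--     idx = line.find(' ')
--     if idx == -1:
--         return line, []
--     idFrom = line[:idx]
--     rest = line[idx + 1:].replace('\n', '')
--     idToList = [x for x in rest.split(' ') if x]
--     return idFrom, idToList
-- ===== Notes on version B (the rewrite author's own statement) =====
-- stated objective: idiomatic
-- what changed: Replaces A's single char-by-char scan with a mutable (spaceCount, idFrom, idTo) accumulator state by idiomatic whole-string operations: find the first space, slice off idFrom, strip newlines from the rest with replace, then split and filter.
import Mathlib
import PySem

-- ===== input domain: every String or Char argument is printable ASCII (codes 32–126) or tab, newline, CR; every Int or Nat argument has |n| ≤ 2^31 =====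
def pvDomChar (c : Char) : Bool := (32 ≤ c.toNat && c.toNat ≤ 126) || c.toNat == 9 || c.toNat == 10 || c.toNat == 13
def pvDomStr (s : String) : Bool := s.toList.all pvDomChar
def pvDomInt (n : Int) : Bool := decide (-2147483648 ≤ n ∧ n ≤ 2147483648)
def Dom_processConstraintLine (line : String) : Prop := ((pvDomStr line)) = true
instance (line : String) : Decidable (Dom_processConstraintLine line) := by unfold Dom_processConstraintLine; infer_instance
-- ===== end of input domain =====

-- B replaces A's manual char-by-char accumulator scan with find/slice/replace/split string passes (idiomatic; same cost).

-- ===== PORT A =====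
-- one step of A's for-loop over the characters; state = (spaceCount, idFrom, idTo)
def pclStep (st : Int × List Char × List Char) (c : Char) : Int × List Char × List Char :=
  let idTo := if 0 < st.1 ∧ c ≠ '\n' then st.2.2 ++ [c] else st.2.2
  if c = ' ' then (st.1 + 1, st.2.1, idTo)
  else if st.1 = 0 then (st.1, st.2.1 ++ [c], idTo)
  else (st.1, st.2.1, idTo)

def processConstraintLine (line : String) : String × List String :=
  let st := line.toList.foldl pclStep (0, [], [])
  -- idTo.split(" "): sep is the literal nonempty " ", so Python's split is total = splitOn
  let idToList := PySem.Chars.splitOn st.2.2 [' ']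
  let idToList := idToList.filter (fun x => !x.isEmpty)   -- [x for x in idToList if x]
  (String.ofList st.2.1, idToList.map String.ofList)

-- ===== PORT B =====
def processConstraintLine_alt (line : String) : String × List String :=
  let idx := PySem.Str.find line " "
  if idx = -1 then (line, [])
  else
    let idFrom := PySem.Str.slice line none (some idx)
    let rest := PySem.Str.replace (PySem.Str.slice line (some (idx + 1)) none) "\n" ""
    -- rest.split(" "): sep is the literal nonempty " ", so Python's split is total = splitOn
    let idToList := (PySem.Chars.splitOn rest.toList [' ']).map String.ofList
    (idFrom, idToList.filter (fun x => !x.toList.isEmpty))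

-- ===== PRECONDITION & SPEC =====
def Spec_processConstraintLine (line : String) (out : String × List String) : Prop := out = processConstraintLine_alt line
instance (line : String) (out : String × List String) : Decidable (Spec_processConstraintLine line out) := by unfold Spec_processConstraintLine; infer_instance

-- ===== CLAIM (what is proved, stated in full; the proofs are below) =====
def Claim_equal_processConstraintLine : Prop := ∀ (line : String), Dom_processConstraintLine line → Spec_processConstraintLine line (processConstraintLine line)

-- ===== LEMMAS AND PROOFS =====

-- A's loop while no space has been seen over space-free input: everything goes to idFrom
theorem pclFold_nospace (cs : List Char) (f t : List Char) (h : ' ' ∉ cs) :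
    cs.foldl pclStep (0, f, t) = (0, f ++ cs, t) := by
  induction cs generalizing f with
  | nil => simp
  | cons c rest ih =>
    have hc : c ≠ ' ' := fun hh => h (hh ▸ List.mem_cons_self)
    simp only [List.foldl_cons, pclStep]
    simp [hc, ih (f := f ++ [c]) (fun hm => h (List.mem_cons_of_mem _ hm))]

-- A's loop after the first space: idFrom frozen, idTo collects every non-newline character
theorem pclFold_after (cs : List Char) (sc : Int) (f t : List Char) (h : 0 < sc) :
    cs.foldl pclStep (sc, f, t) = (sc + cs.count ' ', f, t ++ cs.filter (fun c => !(c == '\n'))) := by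
  induction cs generalizing sc t with
  | nil => simp
  | cons c rest ih =>
    simp only [List.foldl_cons, pclStep]
    by_cases hc : c = ' '
    · subst hc
      have hcond : (0 < sc ∧ ' ' ≠ '\n') := ⟨h, by decide⟩
      rw [if_pos hcond, if_pos rfl, ih _ _ (by omega)]
      simp
      omega
    · have hsc : ¬ sc = 0 := by omega
      by_cases hn : c = '\n'
      · subst hn
        have hcond : ¬ (0 < sc ∧ '\n' ≠ '\n') := by simp
        rw [if_neg hcond, if_neg hc, if_neg hsc, ih _ _ h]
        simp [hc]
      · have hcond : (0 < sc ∧ c ≠ '\n') := ⟨h, hn⟩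
        rw [if_pos hcond, if_neg hc, if_neg hsc, ih _ _ h]
        simp [hc, hn]

theorem space_isPrefixOf (c : Char) (t : List Char) (hc : c ≠ ' ') :
    ¬ ([' '].isPrefixOf (c :: t) = true) := by
  simp only [List.isPrefixOf, Bool.and_eq_true, beq_iff_eq]
  intro hcon
  exact hc hcon.1.symm

theorem newline_isPrefixOf (c : Char) (t : List Char) (hc : c ≠ '\n') :
    ¬ (['\n'].isPrefixOf (c :: t) = true) := by
  simp only [List.isPrefixOf, Bool.and_eq_true, beq_iff_eq]
  intro hcon
  exact hc hcon.1.symm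

-- str.replace(old, "") for a one-character old is a filter
theorem replaceGo_newline (fuel : Nat) (l acc : List Char) (hl : l.length ≤ fuel) :
    PySem.Chars.replace.go ['\n'] [] fuel l acc = acc.reverse ++ l.filter (fun c => !(c == '\n')) := by
  induction fuel generalizing l acc with
  | zero =>
    have : l = [] := List.length_eq_zero_iff.mp (Nat.le_zero.mp hl)
    subst this; simp [PySem.Chars.replace.go]
  | succ n ih =>
    cases l with
    | nil => simp [PySem.Chars.replace.go]
    | cons c t =>
      have hlt : t.length ≤ n := by simpa using hl
      simp only [PySem.Chars.replace.go]
      by_cases hc : c = '\n'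
      · subst hc
        have hpf : ['\n'].isPrefixOf ('\n' :: t) = true := by
          simp [List.isPrefixOf]
        rw [if_pos hpf]
        simpa using ih t acc hlt
      · rw [if_neg (newline_isPrefixOf c t hc), ih t (c :: acc) hlt]
        simp [hc]

theorem replace_newline (l : List Char) :
    PySem.Chars.replace l ['\n'] [] = l.filter (fun c => !(c == '\n')) := by
  simp only [PySem.Chars.replace, List.isEmpty_cons, if_neg Bool.false_ne_true]
  exact replaceGo_newline l.length l [] le_rfl

-- find on a space-free string
theorem findGo_nospace (cs : List Char) (k : Nat) (h : ' ' ∉ cs) :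
    PySem.Chars.find.go [' '] cs k = -1 := by
  induction cs generalizing k with
  | nil => simp [PySem.Chars.find.go]
  | cons c t ih =>
    have hc : c ≠ ' ' := fun hh => h (hh ▸ List.mem_cons_self)
    simp only [PySem.Chars.find.go]
    rw [if_neg (space_isPrefixOf c t hc), ih _ (fun hm => h (List.mem_cons_of_mem _ hm))]

-- find locates the first space
theorem findGo_space (pre post : List Char) (k : Nat) (h : ' ' ∉ pre) :
    PySem.Chars.find.go [' '] (pre ++ ' ' :: post) k = (k : Int) + pre.length := by
  induction pre generalizing k with
  | nil => simp [PySem.Chars.find.go, List.isPrefixOf]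
  | cons c t ih =>
    have hc : c ≠ ' ' := fun hh => h (hh ▸ List.mem_cons_self)
    simp only [List.cons_append, PySem.Chars.find.go]
    rw [if_neg (space_isPrefixOf c _ hc), ih _ (fun hm => h (List.mem_cons_of_mem _ hm))]
    push_cast [List.length_cons]
    omega

theorem exists_first_space (cs : List Char) (h : ' ' ∈ cs) :
    ∃ pre post, cs = pre ++ ' ' :: post ∧ ' ' ∉ pre := by
  induction cs with
  | nil => simp at h
  | cons c t ih =>
    by_cases hc : c = ' '
    · exact ⟨[], t, by simp [hc], by simp⟩
    · obtain ⟨pre, post, h1, h2⟩ := ih (by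
        rcases List.mem_cons.mp h with h' | h'
        · exact absurd h'.symm hc
        · exact h')
      refine ⟨c :: pre, post, by simp [h1], ?_⟩
      intro hm
      rcases List.mem_cons.mp hm with h' | h'
      · exact hc h'.symm
      · exact h2 h'

set_option maxHeartbeats 1000000 in
theorem pcl_eq_alt (line : String) : processConstraintLine line = processConstraintLine_alt line := by
  have hsep : (" " : String).toList = [' '] := rfl
  have hnl : ("\n" : String).toList = ['\n'] := rfl
  have hempty : ("" : String).toList = ([] : List Char) := rfl
  by_cases hs : ' ' ∈ line.toList
  · obtain ⟨pre, post, hsplit, hpre⟩ := exists_first_space line.toList hs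
    have hfind : PySem.Str.find line " " = (pre.length : Int) := by
      simp only [PySem.Str.find, hsplit, hsep]
      simpa using findGo_space pre post 0 hpre
    have hfold : line.toList.foldl pclStep (0, [], []) =
        (1 + (post.count ' ' : Int), pre, post.filter (fun c => !(c == '\n'))) := by
      rw [hsplit, List.foldl_append, pclFold_nospace pre [] [] hpre, List.foldl_cons]
      have hstep : pclStep (0, [] ++ pre, []) ' ' = (1, pre, []) := by
        simp [pclStep]
      rw [hstep, pclFold_after post 1 pre [] (by omega)]
      simp
    have htake : PySem.Str.slice line none (some ((pre.length : Nat) : Int)) = String.ofList pre := by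
      simp [PySem.Str.slice, pysem, hsplit]
    have hdrop : (PySem.Str.slice line (some (((pre.length : Nat) : Int) + 1)) none).toList = post := by
      have hcast : ((pre.length : Nat) : Int) + 1 = (((pre.length + 1 : Nat)) : Int) := by push_cast; ring
      have happ : line.toList = (pre ++ [' ']) ++ post := by simp [hsplit]
      have hlen : (pre ++ [' ']).length = pre.length + 1 := by simp
      simp only [PySem.Str.slice, hcast, happ]
      simp only [pysem]
      rw [← hlen, List.drop_left]
      simp
    have hrest : (PySem.Str.replace (PySem.Str.slice line (some (((pre.length : Nat) : Int) + 1)) none) "\n" "").toList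
        = post.filter (fun c => !(c == '\n')) := by
      rw [PySem.Str.toList_replace, hnl, hempty, hdrop]
      exact replace_newline post
    have hne : ¬ ((pre.length : Int) = -1) := by omega
    simp only [processConstraintLine, processConstraintLine_alt, hfold, hfind]
    rw [if_neg hne]
    rw [Prod.mk.injEq]
    constructor
    · simp [htake]
    · rw [hrest, List.filter_map]
      exact congrArg (List.map String.ofList) (List.filter_congr (fun x _ => by simp))
  · have hfold := pclFold_nospace line.toList [] [] hs
    have hfind : PySem.Str.find line " " = -1 := by
      simp only [PySem.Str.find, hsep]
      exact findGo_nospace line.toList 0 hs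
    simp only [processConstraintLine, processConstraintLine_alt, hfold, hfind]
    rw [if_pos trivial, Prod.mk.injEq]
    have hsplitnil : PySem.Chars.splitOn [] [' '] = [[]] := rfl
    constructor
    · simp
    · simp [hsplitnil]

-- ===== VERDICT (by name: the statement is the Claim_ definition above) =====
theorem processConstraintLine_spec : Claim_equal_processConstraintLine := by
  intro line _
  exact pcl_eq_alt line
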